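-- pv_equiv track=rewrite | github.com/rbbratta/Redfish-Tools | doc-generator/doc_formatter/doc_formatter.py | truncate_version
-- ===== SOURCE A (Python) =====
-- def truncate_version(version_string, num_parts):
--     """Truncate the version string to at least the specified number of parts.
--
--     Maintains additional part(s) if non-zero.
--     """
--
--     parts = version_string.split('.')
--     keep = []
--     for part in parts:
--         if len(keep) < num_parts:
--             keep.append(part)
--         elif part != '0':
--             keep.append(part)
--         else:
--             break
--
--     return '.'.join(keep)
-- ===== SOURCE B (Python) =====
-- def truncate_version(version_string, num_parts):
--     """Truncate the version string to at least the specified number of parts.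
--
--     Maintains additional part(s) if non-zero.
--     """
--     parts = version_string.split('.')
--     k = max(num_parts, 0)
--     head, rest = parts[:k], parts[k:]
--     stop = rest.index('0') if '0' in rest else len(rest)
--     return '.'.join(head + rest[:stop])
-- ===== Notes on version B (the rewrite author's own statement) =====
-- stated objective: alternative
-- what changed: Replaces A's single accumulator loop with its three-way branch and break by two slicing passes: the first max(num_parts,0) parts are kept by slicing, and the trailing nonzero parts are the prefix of the remainder up to the first '0' found by index().
import Mathlib
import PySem

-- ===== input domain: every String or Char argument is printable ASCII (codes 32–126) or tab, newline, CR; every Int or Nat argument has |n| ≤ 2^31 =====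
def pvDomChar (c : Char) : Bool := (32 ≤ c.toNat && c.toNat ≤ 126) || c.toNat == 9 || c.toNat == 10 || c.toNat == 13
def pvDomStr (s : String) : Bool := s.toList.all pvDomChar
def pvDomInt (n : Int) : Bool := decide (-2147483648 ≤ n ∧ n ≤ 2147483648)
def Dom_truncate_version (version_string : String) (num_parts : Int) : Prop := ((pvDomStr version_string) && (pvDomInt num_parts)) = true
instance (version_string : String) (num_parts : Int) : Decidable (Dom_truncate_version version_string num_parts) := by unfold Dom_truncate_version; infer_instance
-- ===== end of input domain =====

-- B replaces A's accumulator loop (append-or-break) by slicing off the first max(num_parts,0)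
-- parts and then taking the prefix of the remainder up to the first "0" (index scan): alternative decomposition, same cost.


-- ===== PORT A =====
-- A's loop: append while len(keep) < num_parts, then append while part != '0', break at the first '0'.
def tvLoopA (num_parts : Int) (keep : List String) : List String → List String
  | [] => keep
  | p :: rest =>
    if (keep.length : Int) < num_parts then tvLoopA num_parts (keep ++ [p]) rest
    else if p ≠ "0" then tvLoopA num_parts (keep ++ [p]) rest
    else keep

-- split('.') with a nonempty separator never raises: split? is always `some` here, .getD [] is exact
def truncate_version (version_string : String) (num_parts : Int) : String :=
  PySem.Str.join "." (tvLoopA num_parts [] ((PySem.Str.split? version_string ".").getD []))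

-- ===== PORT B =====
def truncate_version_alt (version_string : String) (num_parts : Int) : String :=
  let parts := (PySem.Str.split? version_string ".").getD []
  let k : Int := max num_parts 0
  let head := PySem.List.slice parts none (some k)
  let rest := PySem.List.slice parts (some k) none
  let stop : Nat := match PySem.List.index? rest "0" with
    | some i => i
    | none => rest.length
  PySem.Str.join "." (head ++ PySem.List.slice rest none (some (stop : Int)))

-- ===== PRECONDITION & SPEC =====
def Spec_truncate_version (version_string : String) (num_parts : Int) (out : String) : Prop := out = truncate_version_alt version_string num_parts
instance (version_string : String) (num_parts : Int) (out : String) : Decidable (Spec_truncate_version version_string num_parts out) := by unfold Spec_truncate_version; infer_instance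

-- ===== CLAIM (what is proved, stated in full; the proofs are below) =====
def Claim_equal_truncate_version : Prop := ∀ (version_string : String) (num_parts : Int), Dom_truncate_version version_string num_parts → Spec_truncate_version version_string num_parts (truncate_version version_string num_parts)

-- ===== LEMMAS AND PROOFS =====

-- A's loop produces: keep, then the next (n - |keep|)⁺ parts, then the remainder's prefix of non-"0" parts.
lemma tvLoopA_eq (n : Int) (parts : List String) : ∀ keep : List String,
    tvLoopA n keep parts =
      keep ++ (parts.take (n - keep.length).toNat
        ++ (parts.drop (n - keep.length).toNat).takeWhile (· ≠ "0")) := by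
  induction parts with
  | nil => intro keep; simp [tvLoopA]
  | cons p rest ih =>
    intro keep
    by_cases h : (keep.length : Int) < n
    · have hm : (n - keep.length).toNat = (n - (keep.length + 1)).toNat + 1 := by omega
      simp only [tvLoopA, if_pos h, ih (keep ++ [p]), hm]
      simp [List.take_succ_cons]
    · have hm : (n - keep.length).toNat = 0 := by omega
      by_cases hp : p = "0"
      · simp [tvLoopA, if_neg h, hp, hm]
      · have hm' : (n - ((keep ++ [p]).length : Int)).toNat = 0 := by simp; omega
        simp only [tvLoopA, if_neg h, if_pos (by simp [hp] : p ≠ "0"), ih (keep ++ [p]), hm, hm']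
        simp [hp]

-- taking up to the first "0" (index scan) is takeWhile (· ≠ "0")
lemma take_stop_eq (l : List String) :
    l.take (match PySem.List.index? l "0" with | some i => i | none => l.length)
      = l.takeWhile (· ≠ "0") := by
  induction l with
  | nil => simp
  | cons x xs ih =>
    by_cases hx : x = "0"
    · subst hx
      rw [PySem.List.index?_cons_self]
      simp
    · rw [PySem.List.index?_cons_of_ne xs hx]
      cases h : PySem.List.index? xs "0" with
      | none =>
        rw [h] at ih
        simp only [Option.map_none, List.length_cons, List.take_succ_cons, List.takeWhile_cons]
        simp [ih, hx]
      | some i =>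
        rw [h] at ih
        simp only [Option.map_some, List.take_succ_cons, List.takeWhile_cons]
        simp [ih, hx]

-- ===== VERDICT (by name: the statement is the Claim_ definition above) =====
theorem truncate_version_spec : Claim_equal_truncate_version := by
  intro v n _
  unfold Spec_truncate_version truncate_version truncate_version_alt
  congr 1
  set parts := (PySem.Str.split? v ".").getD [] with hp
  have hk : (0:Int) ≤ max n 0 := le_max_right _ _
  rw [PySem.List.slice_to _ hk, PySem.List.slice_from _ hk]
  rw [PySem.List.slice_to_natCast]
  rw [tvLoopA_eq]
  simp only [List.length_nil, Nat.cast_zero, sub_zero, List.nil_append]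
  have hmax : (max n 0).toNat = n.toNat := by omega
  rw [hmax, take_stop_eq]
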